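-- pv_equiv track=rewrite | github.com/MBasyl/PlatoVerification | processingScripts/getPlots.py | match_trigrams_to_full_names
-- ===== SOURCE A (Python) =====
-- def match_trigrams_to_full_names(trigram_names, full_names):
--     matched_names = []
--
--     for trigram in trigram_names:
--         # Check if the trigram matches the first three characters of any full name
--         matches = [full_name for full_name in full_names if full_name.lower(
--         ).startswith(trigram.lower())]
--
--         if matches:
--             matched_names.extend(matches)
--
--     return matched_names
-- ===== SOURCE B (Python) =====
-- def match_trigrams_to_full_names(trigram_names, full_names):
--     # Group the full names once by their lowercased prefix, for each distinct
--     # trigram length, then answer every trigram by a single dictionary lookup.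
--     lengths = list(dict.fromkeys(len(t) for t in trigram_names))
--     groups = {}
--     for full_name in full_names:
--         low = full_name.lower()
--         for L in lengths:
--             groups.setdefault((L, low[:L]), []).append(full_name)
--     return [name
--             for t in trigram_names
--             for name in groups.get((len(t), t.lower()), [])]
-- ===== Notes on version B (the rewrite author's own statement) =====
-- stated objective: faster
-- what changed: Instead of scanning all full names for every trigram, B builds one hash index mapping (length, lowercased prefix) to the full names in order, once per distinct trigram length, and answers each trigram by a single dictionary lookup.
import Mathlib
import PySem

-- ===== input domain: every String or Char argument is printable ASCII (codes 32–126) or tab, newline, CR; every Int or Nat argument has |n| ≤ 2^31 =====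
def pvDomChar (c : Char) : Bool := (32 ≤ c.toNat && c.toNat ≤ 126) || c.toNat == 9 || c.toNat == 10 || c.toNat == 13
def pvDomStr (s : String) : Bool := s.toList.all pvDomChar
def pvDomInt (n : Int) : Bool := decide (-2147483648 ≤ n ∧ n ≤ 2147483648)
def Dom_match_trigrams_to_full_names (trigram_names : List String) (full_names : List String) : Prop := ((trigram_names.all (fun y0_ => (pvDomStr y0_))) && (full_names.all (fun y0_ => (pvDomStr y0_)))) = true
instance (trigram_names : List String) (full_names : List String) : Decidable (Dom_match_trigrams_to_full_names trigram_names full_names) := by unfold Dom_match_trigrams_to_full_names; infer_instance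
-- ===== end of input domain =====

-- B replaces A's per-trigram scan of all full names by one hash index from
-- (prefix length, lowercased prefix) to the matching full names in order (faster).

-- ===== PORT A =====
def match_trigrams_to_full_names (trigram_names : List String) (full_names : List String) : List String :=
  trigram_names.foldl (fun matched_names trigram =>
    let matchesL := full_names.filter (fun full_name =>
      PySem.Str.startswith (PySem.Str.lower full_name) (PySem.Str.lower trigram))
    if matchesL.isEmpty then matched_names else matched_names ++ matchesL) []

-- ===== PORT B =====
def match_trigrams_to_full_names_alt (trigram_names : List String) (full_names : List String) : List String :=
  let lengths : List Int := PySem.List.dedup (trigram_names.map (fun t => PySem.Str.len t))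
  let groups : PySem.Dict (Int × String) (List String) :=
    full_names.foldl (fun d full_name =>
      let low := PySem.Str.lower full_name
      lengths.foldl (fun d L =>
        d.modify (L, PySem.Str.slice low none (some L)) [] (fun v => v ++ [full_name])) d)
      PySem.Dict.empty
  trigram_names.flatMap (fun t =>
    groups.getD (PySem.Str.len t, PySem.Str.lower t) [])

-- ===== PRECONDITION & SPEC =====
def Spec_match_trigrams_to_full_names (trigram_names : List String) (full_names : List String) (out : List String) : Prop := out = match_trigrams_to_full_names_alt trigram_names full_names
instance (trigram_names : List String) (full_names : List String) (out : List String) : Decidable (Spec_match_trigrams_to_full_names trigram_names full_names out) := by unfold Spec_match_trigrams_to_full_names; infer_instance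

-- ===== CLAIM (what is proved, stated in full; the proofs are below) =====
def Claim_equal_match_trigrams_to_full_names : Prop := ∀ (trigram_names : List String) (full_names : List String), Dom_match_trigrams_to_full_names trigram_names full_names → Spec_match_trigrams_to_full_names trigram_names full_names (match_trigrams_to_full_names trigram_names full_names)

-- ===== LEMMAS AND PROOFS =====

-- A's loop as a flatMap of its per-trigram filters (the `if matches:` guard is a no-op).
theorem pv_foldA (fns : List String) (tn : List String) (acc : List String) :
    tn.foldl (fun matched_names trigram =>
      if (fns.filter (fun full_name =>
        PySem.Str.startswith (PySem.Str.lower full_name) (PySem.Str.lower trigram))).isEmpty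
      then matched_names
      else matched_names ++ fns.filter (fun full_name =>
        PySem.Str.startswith (PySem.Str.lower full_name) (PySem.Str.lower trigram))) acc
    = acc ++ tn.flatMap (fun t => fns.filter (fun full_name =>
        PySem.Str.startswith (PySem.Str.lower full_name) (PySem.Str.lower t))) := by
  induction tn generalizing acc with
  | nil => simp
  | cons t tn ih =>
    simp only [List.foldl_cons, List.flatMap_cons, ih]
    split_ifs with h
    · rw [List.isEmpty_iff.mp h]
      simp
    · rw [List.append_assoc]

-- one name's key list, filtered for the key of trigram length Lt: at most the one entry of length Lt survives
theorem pv_inner_filter {f : String} (pf : Int → String) (w : String) (Lt : Int) :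
    ∀ (ls : List Int), ls.Nodup → Lt ∈ ls →
    ((ls.map (fun L => ((L, pf L), f))).filter (fun p => p.1 == (Lt, w))).map (fun p => p.2)
    = if pf Lt == w then [f] else [] := by
  intro ls
  induction ls with
  | nil => intro _ hm; cases hm
  | cons L rest ih =>
    intro hnd hm
    have hnotin : L ∉ rest := (List.nodup_cons.mp hnd).1
    have hnd' : rest.Nodup := (List.nodup_cons.mp hnd).2
    rcases List.mem_cons.mp hm with rfl | hmem
    · have hrest : ((rest.map (fun L => ((L, pf L), f))).filter (fun p => p.1 == (Lt, w))) = [] := by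
        rw [List.filter_eq_nil_iff]
        intro a ha
        obtain ⟨L', hL', rfl⟩ := List.mem_map.mp ha
        simp only [beq_iff_eq, Prod.mk.injEq]
        rintro ⟨rfl, -⟩
        exact hnotin hL'
      simp only [List.map_cons, List.filter_cons, hrest]
      by_cases hw : pf Lt = w
      · simp [hw]
      · simp [hw]
    · have hne : L ≠ Lt := fun h => hnotin (h ▸ hmem)
      simp only [List.map_cons, List.filter_cons]
      have : (((L, pf L), f).1 == (Lt, w)) = false := by
        simp [hne]
      rw [this]
      exact ih hnd' hmem

theorem pv_flatMap_if_eq_filter {α : Type} (c : α → Bool) (l : List α) :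
    (l.flatMap fun a => if c a then [a] else []) = l.filter c := by
  induction l with
  | nil => rfl
  | cons a l ih =>
    simp only [List.flatMap_cons, List.filter_cons, ih]
    split <;> simp

-- the prefix-key comparison IS Python's startswith on the lowercased strings
theorem pv_key_eq_startswith (f t : String) :
    (PySem.Str.slice (PySem.Str.lower f) none (some (PySem.Str.len t)) == PySem.Str.lower t)
    = PySem.Str.startswith (PySem.Str.lower f) (PySem.Str.lower t) := by
  have hlen : PySem.Str.len t = ((t.toList.length : Nat) : Int) := by
    rw [PySem.Str.len_eq]
  have hlow : (PySem.Str.lower t).toList.length = t.toList.length := by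
    rw [PySem.Str.toList_lower]
    simp [PySem.Chars.lower]
  have hiff : PySem.Str.slice (PySem.Str.lower f) none (some (PySem.Str.len t)) = PySem.Str.lower t
      ↔ PySem.Str.startswith (PySem.Str.lower f) (PySem.Str.lower t) = true := by
    rw [PySem.Str.startswith_eq, PySem.Chars.startswith_iff, List.prefix_iff_eq_take,
      ← String.toList_inj, PySem.Str.toList_slice, PySem.Chars.slice_eq_listSlice, hlen,
      PySem.List.slice_to_natCast, hlow]
    exact ⟨fun h => h.symm, fun h => h.symm⟩
  by_cases h : PySem.Str.slice (PySem.Str.lower f) none (some (PySem.Str.len t)) = PySem.Str.lower t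
  · rw [beq_iff_eq.mpr h, hiff.mp h]
  · have hs : PySem.Str.startswith (PySem.Str.lower f) (PySem.Str.lower t) = false := by
      cases hb : PySem.Str.startswith (PySem.Str.lower f) (PySem.Str.lower t)
      · rfl
      · exact absurd (hiff.mpr hb) h
    rw [beq_eq_false_iff_ne.mpr h, hs]

-- B's grouped index answers each trigram with exactly A's filtered list
theorem pv_groups_getD (lengths : List Int) (hnd : lengths.Nodup) (fns : List String)
    (t : String) (hmem : PySem.Str.len t ∈ lengths) :
    (fns.foldl (fun d full_name =>
      lengths.foldl (fun d L =>
        d.modify (L, PySem.Str.slice (PySem.Str.lower full_name) none (some L)) []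
          (fun v => v ++ [full_name])) d)
      (PySem.Dict.empty : PySem.Dict (Int × String) (List String))).getD
        (PySem.Str.len t, PySem.Str.lower t) []
    = fns.filter (fun full_name =>
        PySem.Str.startswith (PySem.Str.lower full_name) (PySem.Str.lower t)) := by
  have hfold : (fns.foldl (fun d full_name =>
      lengths.foldl (fun d L =>
        d.modify (L, PySem.Str.slice (PySem.Str.lower full_name) none (some L)) []
          (fun v => v ++ [full_name])) d)
      (PySem.Dict.empty : PySem.Dict (Int × String) (List String)))
      = ((fns.flatMap (fun full_name => lengths.map (fun L =>
            ((L, PySem.Str.slice (PySem.Str.lower full_name) none (some L)), full_name)))).foldl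
          (fun d p => d.modify p.1 [] (fun v => v ++ [p.2])) PySem.Dict.empty) := by
    rw [List.foldl_flatMap]
    simp only [List.foldl_map]
  rw [hfold, PySem.Dict.getD_foldl_modify_append, PySem.Dict.getD_empty, List.nil_append,
    List.filter_flatMap, List.map_flatMap]
  have hinner : ∀ full_name : String,
      (((lengths.map (fun L =>
          ((L, PySem.Str.slice (PySem.Str.lower full_name) none (some L)), full_name))).filter
            (fun p => p.1 == (PySem.Str.len t, PySem.Str.lower t))).map (fun p => p.2))
      = if PySem.Str.startswith (PySem.Str.lower full_name) (PySem.Str.lower t) then [full_name] else [] := by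
    intro full_name
    rw [pv_inner_filter (fun L => PySem.Str.slice (PySem.Str.lower full_name) none (some L))
      (PySem.Str.lower t) (PySem.Str.len t) lengths hnd hmem, pv_key_eq_startswith]
  calc (fns.flatMap fun full_name =>
          (((lengths.map (fun L =>
            ((L, PySem.Str.slice (PySem.Str.lower full_name) none (some L)), full_name))).filter
              (fun p => p.1 == (PySem.Str.len t, PySem.Str.lower t))).map (fun p => p.2)))
      = fns.flatMap (fun full_name =>
          if PySem.Str.startswith (PySem.Str.lower full_name) (PySem.Str.lower t)
          then [full_name] else []) := by
        exact List.flatMap_congr (fun f _ => hinner f)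
    _ = _ := pv_flatMap_if_eq_filter _ fns

-- ===== VERDICT (by name: the statement is the Claim_ definition above) =====
theorem match_trigrams_to_full_names_spec : Claim_equal_match_trigrams_to_full_names := by
  intro tn fns _
  unfold Spec_match_trigrams_to_full_names
  simp only [match_trigrams_to_full_names, match_trigrams_to_full_names_alt]
  rw [pv_foldA, List.nil_append]
  apply List.flatMap_congr
  intro t ht
  rw [pv_groups_getD _ (PySem.List.nodup_dedup _) fns t
    ((PySem.List.mem_dedup _ _).mpr (List.mem_map_of_mem ht))]
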